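-- pv_equiv track=rewrite | github.com/g0dux/AresProbe | aresprobe/core/token_sequencer.py | _has_length_pattern
-- ===== SOURCE A (Python) =====
-- from typing import Dict, List, Optional, Any, Tuple
--
-- def _has_length_pattern(tokens: List[str]) -> bool:
--     """Check for length patterns"""
--     if len(tokens) < 3:
--         return False
--
--     lengths = [len(token) for token in tokens]
--
--     # Check for consistent length
--     if len(set(lengths)) == 1:
--         return True
--
--     # Check for incremental length
--     length_diffs = [lengths[i+1] - lengths[i] for i in range(len(lengths)-1)]
--     if len(set(length_diffs)) == 1:
--         return True
--
--     return False
-- ===== SOURCE B (Python) =====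
-- from typing import Dict, List, Optional, Any, Tuple
--
-- def _has_length_pattern(tokens: List[str]) -> bool:
--     """Check for length patterns: token lengths form an arithmetic progression
--     iff every interior token's length is the average of its neighbours'
--     (second differences are zero); constant length is the zero-difference case."""
--     if len(tokens) < 3:
--         return False
--     return all(2 * len(b) == len(a) + len(c)
--                for a, b, c in zip(tokens, tokens[1:], tokens[2:]))
-- ===== Notes on version B (the rewrite author's own statement) =====
-- stated objective: simpler
-- what changed: Replaces A's two global set constructions (set of lengths, set of consecutive differences) by a local second-difference characterisation: the length sequence is arithmetic (constant included) iff every interior length is the exact average of its two neighbours, checked over zip(tokens, tokens[1:], tokens[2:]) with no intermediate lists or sets and short-circuiting on the first violation.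
import Mathlib
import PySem

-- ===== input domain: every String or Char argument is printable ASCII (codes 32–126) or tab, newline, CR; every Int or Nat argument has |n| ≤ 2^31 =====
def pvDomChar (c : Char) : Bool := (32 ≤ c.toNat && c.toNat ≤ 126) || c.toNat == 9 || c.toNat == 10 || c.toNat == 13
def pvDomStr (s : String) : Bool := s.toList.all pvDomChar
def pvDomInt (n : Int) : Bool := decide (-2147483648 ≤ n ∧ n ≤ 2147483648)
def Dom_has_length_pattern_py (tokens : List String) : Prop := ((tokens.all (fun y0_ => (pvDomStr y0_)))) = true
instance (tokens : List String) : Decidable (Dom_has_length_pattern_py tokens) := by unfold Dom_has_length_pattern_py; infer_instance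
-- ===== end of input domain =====

-- B replaces A's two global set constructions by a local second-difference test:
-- the lengths are arithmetic iff each interior length is the average of its
-- neighbours, checked over zipped triples; objective: simpler.

-- ===== PORT A =====
def has_length_pattern_py (tokens : List String) : Bool :=
  if (tokens.length : Int) < 3 then false
  else
    let lengths : List Int := tokens.map (fun token => PySem.Str.len token)
    if PySem.Set.len (PySem.Set.ofList lengths) = 1 then true
    else
      -- indices i and i+1 are always in range here, so pyGetD with default 0 is exact
      let length_diffs : List Int :=
        (PySem.List.pyRange 0 ((lengths.length : Int) - 1)).map
          (fun i => PySem.List.pyGetD lengths (i + 1) 0 - PySem.List.pyGetD lengths i 0)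
      if PySem.Set.len (PySem.Set.ofList length_diffs) = 1 then true
      else false

-- ===== PORT B =====
def has_length_pattern_py_alt (tokens : List String) : Bool :=
  if (tokens.length : Int) < 3 then false
  else
    ((tokens.zip (PySem.List.slice tokens (some 1) none)).zip
        (PySem.List.slice tokens (some 2) none)).all
      (fun abc => 2 * PySem.Str.len abc.1.2 == PySem.Str.len abc.1.1 + PySem.Str.len abc.2)

-- ===== PRECONDITION & SPEC =====
def Spec_has_length_pattern_py (tokens : List String) (out : Bool) : Prop := out = has_length_pattern_py_alt tokens
instance (tokens : List String) (out : Bool) : Decidable (Spec_has_length_pattern_py tokens out) := by unfold Spec_has_length_pattern_py; infer_instance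

-- ===== CLAIM (what is proved, stated in full; the proofs are below) =====
def Claim_equal_has_length_pattern_py : Prop := ∀ (tokens : List String), Dom_has_length_pattern_py tokens → Spec_has_length_pattern_py tokens (has_length_pattern_py tokens)

-- ===== LEMMAS AND PROOFS =====

-- len(set(a :: xs)) == 1 says exactly that every element of xs equals a
theorem setlen_one_iff (a : Int) (xs : List Int) :
    PySem.Set.len (PySem.Set.ofList (a :: xs)) = 1 ↔ ∀ x ∈ xs, x = a := by
  constructor
  · intro h x hx
    have hlen : (PySem.Set.ofList (a :: xs)).length = 1 := by
      simpa [PySem.Set.len] using h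
    obtain ⟨y, hy⟩ := List.length_eq_one_iff.mp hlen
    have hxm : x ∈ PySem.Set.ofList (a :: xs) :=
      (PySem.Set.mem_ofList _ x).mpr (List.mem_cons_of_mem a hx)
    have ham : a ∈ PySem.Set.ofList (a :: xs) :=
      (PySem.Set.mem_ofList _ a).mpr (List.mem_cons_self)
    rw [hy] at hxm ham
    simp at hxm ham
    rw [hxm, ham]
  · intro h
    have hmem : ∀ y ∈ PySem.Set.ofList (a :: xs), y = a := by
      intro y hy
      rcases List.mem_cons.mp ((PySem.Set.mem_ofList _ y).mp hy) with rfl | hy'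
      · rfl
      · exact h y hy'
    have ham : a ∈ PySem.Set.ofList (a :: xs) :=
      (PySem.Set.mem_ofList _ a).mpr (List.mem_cons_self)
    have hnd := PySem.Set.nodup_ofList (a :: xs)
    rcases hl : PySem.Set.ofList (a :: xs) with _ | ⟨y, ys⟩
    · rw [hl] at ham; simp at ham
    · rcases ys with _ | ⟨z, zs⟩
      · simp [PySem.Set.len]
      · exfalso
        have h1 : y = a := hmem y (by rw [hl]; simp)
        have h2 : z = a := hmem z (by rw [hl]; simp)
        rw [hl, h1, h2] at hnd
        simp at hnd

-- arithmetic core: "all equal, or all consecutive differences equal" is exactly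
-- "each interior value is the average of its neighbours" (second differences zero)
theorem local_iff (G : Int → Int) (nn : Int) :
    ((∀ k : Int, 0 ≤ k → k < nn → G k = G 0) ∨
      (∀ j : Int, 1 ≤ j → j < nn - 1 → G (j + 1) - G j = G 1 - G 0))
    ↔ (∀ i : Int, 0 ≤ i → i + 2 < nn → 2 * G (i + 1) = G i + G (i + 2)) := by
  constructor
  · rintro (hc | he)
    · intro i h0 hi
      rw [hc i (by omega) (by omega), hc (i + 1) (by omega) (by omega),
        hc (i + 2) (by omega) (by omega)]
      ring
    · intro i h0 hi
      have h2 : G (i + 2) - G (i + 1) = G 1 - G 0 := by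
        have := he (i + 1) (by omega) (by omega)
        have e : i + 1 + 1 = i + 2 := by ring
        rw [e] at this; exact this
      have h1 : G (i + 1) - G i = G 1 - G 0 := by
        rcases eq_or_lt_of_le h0 with h | h
        · rw [← h]; ring_nf
        · exact he i (by omega) (by omega)
      omega
  · intro hl
    right
    have key : ∀ j : Int, 0 ≤ j → (j < nn - 1 → G (j + 1) - G j = G 1 - G 0) := by
      intro j hj
      induction j, hj using Int.le_induction with
      | base => intro _; ring_nf
      | succ k hk ih =>
        intro hkn
        have hloc := hl k hk (by omega)
        have := ih (by omega)
        rw [show k + 1 + 1 = k + 2 from by ring]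
        omega
    intro j h1 hj
    exact key j (by omega) hj

-- getD at an in-range index is a member of the list
theorem getD_mem {α : Type} (l : List α) (k : Nat) (d : α) (h : k < l.length) :
    l.getD k d ∈ l := by
  induction l generalizing k with
  | nil => simp at h
  | cons a as ih =>
    cases k with
    | zero => simp
    | succ k' =>
      simp only [List.getD_cons_succ]
      exact List.mem_cons_of_mem a (ih k' (by simpa using h))

-- every member of a list is a getD at some in-range index
theorem mem_getD {α : Type} (l : List α) (x : α) (d : α) (h : x ∈ l) :
    ∃ k, k < l.length ∧ l.getD k d = x := by
  induction l with
  | nil => simp at h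
  | cons a as ih =>
    rcases List.mem_cons.mp h with rfl | h'
    · exact ⟨0, by simp, by simp⟩
    · obtain ⟨k, hk, hx⟩ := ih h'
      exact ⟨k + 1, by simpa using Nat.succ_lt_succ hk, by simpa using hx⟩

-- (if c1 then true else if c2 then true else false) = true ↔ c1 ∨ c2
theorem ite_or_true {c1 c2 : Prop} [Decidable c1] [Decidable c2] :
    ((if c1 then true else if c2 then true else (false : Bool)) = true) ↔ (c1 ∨ c2) := by
  by_cases h1 : c1 <;> by_cases h2 : c2 <;> simp [h1, h2]

-- B's zipped-triples scan, read off position by position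
theorem zip_all_iff (l : List String) :
    (((l.zip (l.drop 1)).zip (l.drop 2)).all
        (fun abc => 2 * PySem.Str.len abc.1.2 == PySem.Str.len abc.1.1 + PySem.Str.len abc.2)
      = true)
    ↔ (∀ j : Nat, (hj : j + 2 < l.length) →
        2 * PySem.Str.len (l[j + 1]'(by omega)) =
          PySem.Str.len (l[j]'(by omega)) + PySem.Str.len (l[j + 2]'hj)) := by
  have hzlen : ((l.zip (l.drop 1)).zip (l.drop 2)).length = l.length - 2 := by
    simp; omega
  rw [List.all_eq_true]
  constructor
  · intro h j hj
    have hjlt : j < ((l.zip (l.drop 1)).zip (l.drop 2)).length := by omega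
    have hmem : ((l.zip (l.drop 1)).zip (l.drop 2))[j] ∈ (l.zip (l.drop 1)).zip (l.drop 2) :=
      List.getElem_mem hjlt
    have := h _ hmem
    have hel : ((l.zip (l.drop 1)).zip (l.drop 2))[j] =
        ((l[j]'(by omega), l[j + 1]'(by omega)), l[j + 2]'hj) := by
      simp [List.getElem_zip, Nat.add_comm]
    rw [hel] at this
    simpa using this
  · intro h x hx
    obtain ⟨j, hjlt, rfl⟩ := List.mem_iff_getElem.mp hx
    have hj : j + 2 < l.length := by omega
    have hel' : ((l.zip (l.drop 1)).zip (l.drop 2))[j] =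
        ((l[j]'(by omega), l[j + 1]'(by omega)), l[j + 2]'hj) := by
      simp [List.getElem_zip, Nat.add_comm]
    rw [hel']
    simpa using h j hj

theorem main_eq (tokens : List String) :
    has_length_pattern_py tokens = has_length_pattern_py_alt tokens := by
  rcases tokens with _ | ⟨t0, _ | ⟨t1, _ | ⟨t2, rest⟩⟩⟩
  · simp [has_length_pattern_py, has_length_pattern_py_alt]
  · simp [has_length_pattern_py, has_length_pattern_py_alt]
  · simp [has_length_pattern_py, has_length_pattern_py_alt]
  · have hguard : ¬ (((t0 :: t1 :: t2 :: rest).length : Int) < 3) := by simp; omega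
    rw [Bool.eq_iff_iff]
    unfold has_length_pattern_py has_length_pattern_py_alt
    rw [if_neg hguard, if_neg hguard]
    rw [PySem.List.slice_from_one,
      show PySem.List.slice (t0 :: t1 :: t2 :: rest) (some 2) none
          = (t0 :: t1 :: t2 :: rest).drop 2 from by
        rw [show (2 : Int) = ((2 : Nat) : Int) from rfl, PySem.List.slice_from_natCast]]
    set l := t0 :: t1 :: t2 :: rest with hl
    simp only [ite_or_true]
    rw [← List.drop_one]
    set L : List Int := l.map (fun token => PySem.Str.len token) with hLdef
    have hLlen : L.length = rest.length + 3 := by rw [hLdef, hl]; simp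
    have hlen_tok : l.length = L.length := by rw [hLdef, List.length_map]
    have h00 : PySem.List.pyGetD L 0 0 = PySem.Str.len t0 := by
      have := PySem.List.pyGetD_natCast L 0 (0 : Int)
      rw [show (((0 : Nat) : Int)) = (0 : Int) from rfl] at this
      rw [this, hLdef, hl]; rfl
    -- A's constant-length test, index form
    have hC : (PySem.Set.ofList L).len = 1 ↔
        (∀ k : Int, 0 ≤ k → k < (L.length : Int) →
          PySem.List.pyGetD L k 0 = PySem.List.pyGetD L 0 0) := by
      rw [h00, hLdef, hl, List.map_cons, setlen_one_iff]
      constructor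
      · intro h k h0 hk
        lift k to Nat using h0 with k'
        rw [PySem.List.pyGetD_natCast]
        cases k' with
        | zero => simp
        | succ j =>
          rw [List.getD_cons_succ]
          apply h
          apply getD_mem
          simp only [List.length_map, List.length_cons]
          have : (j : Int) + 1 < (rest.length : Int) + 1 + 1 + 1 := by
            simpa using hk
          omega
      · intro h x hx
        obtain ⟨j, hj, hx'⟩ :=
          mem_getD (List.map (fun token => PySem.Str.len token) (t1 :: t2 :: rest)) x 0 hx
        have hb : ((j : Int) + 1) < (((PySem.Str.len t0 ::
            List.map (fun token => PySem.Str.len token) (t1 :: t2 :: rest)).length : Nat) : Int) := by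
          simp only [List.length_cons, List.length_map] at hj ⊢
          omega
        have := h ((j : Int) + 1) (by omega) hb
        rw [show ((j : Int) + 1) = (((j + 1 : Nat) : Int)) from by push_cast; ring,
          PySem.List.pyGetD_natCast, List.getD_cons_succ, hx'] at this
        exact this
    -- A's incremental-length test, index form
    have hE : (PySem.Set.ofList
          (List.map (fun i => PySem.List.pyGetD L (i + 1) 0 - PySem.List.pyGetD L i 0)
            (PySem.List.pyRange 0 ((L.length : Int) - 1)))).len = 1 ↔
        (∀ j : Int, 1 ≤ j → j < (L.length : Int) - 1 →
          PySem.List.pyGetD L (j + 1) 0 - PySem.List.pyGetD L j 0 =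
            PySem.List.pyGetD L 1 0 - PySem.List.pyGetD L 0 0) := by
      have hpos : (0 : Int) < (L.length : Int) - 1 := by rw [hLlen]; push_cast; omega
      rw [PySem.List.pyRange_one_cons hpos, List.map_cons, setlen_one_iff]
      constructor
      · intro h j h1 hj
        have := h (PySem.List.pyGetD L (j + 1) 0 - PySem.List.pyGetD L j 0)
          (List.mem_map_of_mem ((PySem.List.mem_pyRange_one).mpr ⟨by omega, hj⟩))
        rw [this]; norm_num
      · intro h x hx
        obtain ⟨j, hjm, rfl⟩ := List.mem_map.mp hx
        obtain ⟨hj1, hj2⟩ := (PySem.List.mem_pyRange_one).mp hjm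
        rw [h j (by omega) hj2]; norm_num
    have hloc := local_iff (fun i => PySem.List.pyGetD L i 0) (L.length : Int)
    simp only [] at hloc
    rw [hC, hE, hloc, zip_all_iff]
    -- bridge: integer-index local condition on L ↔ Nat-index local condition on l
    have hbridge : ∀ j : Nat, (hj : j + 2 < l.length) →
        (2 * PySem.List.pyGetD L ((j : Int) + 1) 0 =
            PySem.List.pyGetD L (j : Int) 0 + PySem.List.pyGetD L ((j : Int) + 2) 0
          ↔ 2 * PySem.Str.len (l[j + 1]'(by omega)) =
            PySem.Str.len (l[j]'(by omega)) + PySem.Str.len (l[j + 2]'hj)) := by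
      intro j hj
      have e1 : ((j : Int) + 1) = (((j + 1 : Nat) : Int)) := by push_cast; ring
      have e2 : ((j : Int) + 2) = (((j + 2 : Nat) : Int)) := by push_cast; ring
      rw [e1, e2, PySem.List.pyGetD_natCast, PySem.List.pyGetD_natCast,
        PySem.List.pyGetD_natCast, hLdef]
      have hjl : j < l.length := by omega
      have hj1 : j + 1 < l.length := by omega
      rw [List.getD_eq_getElem _ _ (by simpa using hj1),
        List.getD_eq_getElem _ _ (by simpa using hjl),
        List.getD_eq_getElem _ _ (by simpa using hj)]
      simp
    constructor
    · intro h j hj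
      have := h (j : Int) (by omega) (by rw [← hlen_tok] at *; omega)
      exact (hbridge j hj).mp this
    · intro h i h0 hi
      lift i to Nat using h0 with j
      have hj : j + 2 < l.length := by rw [hlen_tok]; omega
      exact (hbridge j hj).mpr (h j hj)

-- ===== VERDICT (by name: the statement is the Claim_ definition above) =====
theorem has_length_pattern_py_spec : Claim_equal_has_length_pattern_py := by
  intro tokens _
  unfold Spec_has_length_pattern_py
  exact main_eq tokens
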